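-- pv_equiv track=rewrite | github.com/DmitryPukhov/pyquiz | pyquiz/leetcode/IntegerToEnglishWords.py | _buckets_of
-- ===== SOURCE A (Python) =====
-- def _buckets_of(num: int):
--     if num == 0:
--         return [0]
--     buckets = []
--     while num > 0:
--         buckets.append(num % 1000)
--         num = num // 1000
--     buckets.reverse()
--     return buckets
-- ===== SOURCE B (Python) =====
-- def _buckets_of(num: int):
--     divisor = 1
--     while divisor * 1000 <= num:
--         divisor *= 1000
--     buckets = []
--     while divisor > 0:
--         buckets.append(num // divisor)
--         num %= divisor
--         divisor //= 1000
--     return buckets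
-- ===== Notes on version B (the rewrite author's own statement) =====
-- stated objective: alternative
-- what changed: B finds the top power-of-1000 divisor and emits base-1000 groups most-significant-first by repeated div/mod with a shrinking divisor (no special cases needed), instead of collecting remainders least-significant-first and reversing; Pre_ excludes negative inputs, on which A's empty list is an accident of its while-loop never running and no value is specified.
-- outside the precondition, e.g. on _buckets_of(-5): A returns [], B returns [-5]
import Mathlib
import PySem

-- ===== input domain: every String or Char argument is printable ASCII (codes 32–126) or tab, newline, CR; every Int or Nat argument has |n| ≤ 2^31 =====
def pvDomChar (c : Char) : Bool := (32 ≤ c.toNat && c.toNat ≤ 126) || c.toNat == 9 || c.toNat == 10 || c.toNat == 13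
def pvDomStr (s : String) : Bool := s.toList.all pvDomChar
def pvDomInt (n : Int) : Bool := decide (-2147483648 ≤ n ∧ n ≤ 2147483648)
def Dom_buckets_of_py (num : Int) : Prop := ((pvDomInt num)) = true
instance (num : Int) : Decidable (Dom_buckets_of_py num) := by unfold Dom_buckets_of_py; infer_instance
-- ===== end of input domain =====

-- B splits the number into base-1000 groups most-significant-first with a shrinking
-- power-of-1000 divisor instead of A's collect-remainders-then-reverse; same cost,
-- different decomposition; negative inputs are outside Pre_.

-- ===== PORT A =====
-- 'while num > 0: buckets.append(num % 1000); num = num // 1000'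
def bucketsLoopA (num : Int) (acc : List Int) : List Int :=
  if 0 < num then
    bucketsLoopA (PySem.Int.floordiv num 1000) (acc ++ [PySem.Int.mod num 1000])
  else acc
termination_by num.toNat
decreasing_by
  rw [PySem.Int.floordiv_eq_ediv_of_pos (by omega : (0:Int) < 1000)]
  omega

def buckets_of_py (num : Int) : List Int :=
  if num = 0 then [0] else (bucketsLoopA num []).reverse

-- ===== PORT B =====
-- 'while divisor * 1000 <= num: divisor *= 1000'  (called with 0 < divisor)
def topDivB (num : Int) (d : Int) (hd : 0 < d) : Int :=
  if d * 1000 ≤ num then topDivB num (d * 1000) (by omega) else d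
termination_by (num - d).toNat
decreasing_by omega

-- 'while divisor > 0: buckets.append(num // divisor); num %= divisor; divisor //= 1000'
def emitLoopB (num : Int) (d : Int) (acc : List Int) : List Int :=
  if 0 < d then
    emitLoopB (PySem.Int.mod num d) (PySem.Int.floordiv d 1000) (acc ++ [PySem.Int.floordiv num d])
  else acc
termination_by d.toNat
decreasing_by
  rw [PySem.Int.floordiv_eq_ediv_of_pos (by omega : (0:Int) < 1000)]
  omega

def buckets_of_py_alt (num : Int) : List Int :=
  emitLoopB num (topDivB num 1 (by omega)) []

-- ===== PRECONDITION & SPEC =====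
-- Pre_ excludes negative inputs: A's while-loop never runs there and its empty list is
-- an accident of the implementation, not a specified value for this corner.
def Pre_buckets_of_py (num : Int) : Prop := 0 ≤ num
instance (num : Int) : Decidable (Pre_buckets_of_py num) := by unfold Pre_buckets_of_py; infer_instance
def pvWitness_buckets_of_py : Int := (1234567)

def Spec_buckets_of_py (num : Int) (out : List Int) : Prop := out = buckets_of_py_alt num
instance (num : Int) (out : List Int) : Decidable (Spec_buckets_of_py num out) := by unfold Spec_buckets_of_py; infer_instance

-- ===== CLAIM (what is proved, stated in full; the proofs are below) =====
def Claim_equal_buckets_of_py : Prop := ∀ (num : Int), Dom_buckets_of_py num → Pre_buckets_of_py num → Spec_buckets_of_py num (buckets_of_py num)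

-- ===== LEMMAS AND PROOFS =====

-- base-1000 digits of num, least significant first (A's loop without the accumulator)
def pvDigits (num : Int) : List Int :=
  if 0 < num then num % 1000 :: pvDigits (num / 1000) else []
termination_by num.toNat
decreasing_by omega

-- exactly k+1 base-1000 digits of num, least significant first (no leading-zero trimming)
def pvPad : Nat → Int → List Int
  | 0, num => [num]
  | k + 1, num => num % 1000 :: pvPad k (num / 1000)

lemma pv_mod_mul_div (a b c : Int) (hb : 0 < b) : (a % (b * c)) / b = a / b % c := by
  have hq : a % (b * c) = a + (-(c * (a / (b * c)))) * b := by rw [Int.emod_def]; ring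
  rw [hq, Int.add_mul_ediv_right _ _ (by omega : b ≠ 0), Int.emod_def,
      Int.ediv_ediv_of_nonneg (by omega : (0:Int) ≤ b)]
  ring

lemma loopA_digits (n : Nat) : ∀ (num : Int) (acc : List Int), num.toNat ≤ n →
    bucketsLoopA num acc = acc ++ pvDigits num := by
  induction n with
  | zero =>
    intro num acc h
    have hnp : ¬ 0 < num := by omega
    rw [bucketsLoopA, pvDigits]
    simp [hnp]
  | succ n ih =>
    intro num acc h
    rw [bucketsLoopA, pvDigits]
    by_cases hp : 0 < num
    · have hfd : PySem.Int.floordiv num 1000 = num / 1000 :=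
        PySem.Int.floordiv_eq_ediv_of_pos (by omega)
      have hmd : PySem.Int.mod num 1000 = num % 1000 :=
        PySem.Int.mod_eq_emod_of_pos (by omega)
      simp only [hp, if_true, hfd, hmd]
      rw [ih _ _ (by omega)]
      simp
    · simp [hp]

lemma emit_acc (n : Nat) : ∀ (num d : Int) (acc : List Int), d.toNat ≤ n →
    emitLoopB num d acc = acc ++ emitLoopB num d [] := by
  induction n with
  | zero =>
    intro num d acc h
    have hnp : ¬ 0 < d := by omega
    rw [emitLoopB]
    conv_rhs => rw [emitLoopB]
    simp [hnp]
  | succ n ih =>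
    intro num d acc h
    by_cases hp : 0 < d
    · have hfd : PySem.Int.floordiv d 1000 = d / 1000 :=
        PySem.Int.floordiv_eq_ediv_of_pos (by omega)
      conv_lhs => rw [emitLoopB]
      conv_rhs => rw [emitLoopB]
      simp only [hp, if_true, hfd]
      have hlt : (d / 1000).toNat ≤ n := by omega
      rw [ih _ _ (acc ++ [PySem.Int.floordiv num d]) hlt, ih _ _ ([] ++ [PySem.Int.floordiv num d]) hlt]
      simp
    · rw [emitLoopB]
      conv_rhs => rw [emitLoopB]
      simp [hp]

lemma topDivB_spec (n : Nat) : ∀ (num d : Int) (hd : 0 < d), (num - d).toNat ≤ n → d ≤ num →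
    ∃ j : Nat, topDivB num d hd = d * 1000 ^ j ∧ topDivB num d hd ≤ num ∧
      num < 1000 * topDivB num d hd := by
  induction n with
  | zero =>
    intro num d hd h hle
    rw [topDivB]
    have hno : ¬ d * 1000 ≤ num := by omega
    simp only [hno, if_false]
    exact ⟨0, by ring, hle, by omega⟩
  | succ n ih =>
    intro num d hd h hle
    rw [topDivB]
    by_cases hstep : d * 1000 ≤ num
    · simp only [hstep, if_true]
      obtain ⟨j, hj, hl, hr⟩ := ih num (d * 1000) (by omega) (by omega) (by omega)
      exact ⟨j + 1, by rw [hj]; ring, hl, hr⟩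
    · simp only [hstep, if_false]
      exact ⟨0, by ring, hle, by omega⟩

lemma digits_pad (k : Nat) : ∀ num : Int, 1000 ^ k ≤ num → num < 1000 ^ (k + 1) →
    pvDigits num = pvPad k num := by
  induction k with
  | zero =>
    intro num h1 h2
    have h1' : (1:Int) ≤ num := by simpa using h1
    have h2' : num < 1000 := by simpa using h2
    rw [pvDigits]
    have hp : 0 < num := by omega
    simp only [hp, if_true]
    rw [Int.emod_eq_of_lt (by omega) h2', Int.ediv_eq_zero_of_lt (by omega) h2', pvDigits]
    simp [pvPad]
  | succ k ih =>
    intro num h1 h2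
    have hpowpos : (0:Int) < 1000 ^ (k + 1) := by positivity
    have hp : 0 < num := by omega
    rw [pvDigits]
    simp only [hp, if_true]
    have hlow : 1000 ^ k ≤ num / 1000 := by
      rw [Int.le_ediv_iff_mul_le (by omega : (0:Int) < 1000)]
      calc (1000:Int) ^ k * 1000 = 1000 ^ (k + 1) := by rw [pow_succ]
        _ ≤ num := h1
    have hhigh : num / 1000 < 1000 ^ (k + 1) := by
      rw [Int.ediv_lt_iff_lt_mul (by omega : (0:Int) < 1000)]
      calc num < 1000 ^ (k + 1 + 1) := h2
        _ = 1000 ^ (k + 1) * 1000 := by rw [pow_succ]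
    rw [ih _ hlow hhigh]
    rfl

lemma pad_split (k : Nat) : ∀ num : Int, 0 ≤ num →
    pvPad (k + 1) num = pvPad k (num % 1000 ^ (k + 1)) ++ [num / 1000 ^ (k + 1)] := by
  induction k with
  | zero =>
    intro num _
    simp [pvPad, pow_one]
  | succ k ih =>
    intro num hnn
    have hsplit : (1000:Int) ^ (k + 1 + 1) = 1000 * 1000 ^ (k + 1) := by
      rw [pow_succ]; ring
    have hmod : num % 1000 ^ (k + 1 + 1) % 1000 = num % 1000 := by
      rw [Int.emod_emod_of_dvd _ ⟨1000 ^ (k + 1), hsplit⟩]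
    have hdiv : num % 1000 ^ (k + 1 + 1) / 1000 = num / 1000 % 1000 ^ (k + 1) := by
      rw [hsplit, pv_mod_mul_div _ _ _ (by omega)]
    have htop : num / 1000 / 1000 ^ (k + 1) = num / 1000 ^ (k + 1 + 1) := by
      rw [Int.ediv_ediv_of_nonneg (by omega : (0:Int) ≤ 1000), ← pow_succ']
    show num % 1000 :: pvPad (k + 1) (num / 1000) = _
    rw [ih (num / 1000) (by positivity)]
    show _ = num % 1000 ^ (k+1+1) % 1000 :: (pvPad k (num % 1000 ^ (k+1+1) / 1000) ++ [num / 1000 ^ (k+1+1)])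
    rw [hmod, hdiv, htop]

lemma emit_pad (k : Nat) : ∀ num : Int, 0 ≤ num → num < 1000 ^ (k + 1) →
    emitLoopB num (1000 ^ k) [] = (pvPad k num).reverse := by
  induction k with
  | zero =>
    intro num hnn _
    rw [emitLoopB]
    simp only [pow_zero, (by omega : (0:Int) < 1), if_true]
    rw [emitLoopB]
    have h1 : PySem.Int.floordiv (1:Int) 1000 = 0 := by decide
    have h2 : PySem.Int.floordiv num 1 = num := by
      rw [PySem.Int.floordiv_eq_ediv_of_pos (by omega)]; exact Int.ediv_one num
    simp [pvPad]
  | succ k ih =>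
    intro num hnn hub
    have hDpos : (0:Int) < 1000 ^ (k + 1) := by positivity
    rw [emitLoopB]
    simp only [hDpos, if_true]
    have hmd : PySem.Int.mod num (1000 ^ (k + 1)) = num % 1000 ^ (k + 1) :=
      PySem.Int.mod_eq_emod_of_pos hDpos
    have hfd : PySem.Int.floordiv num (1000 ^ (k + 1)) = num / 1000 ^ (k + 1) :=
      PySem.Int.floordiv_eq_ediv_of_pos hDpos
    have hdd : PySem.Int.floordiv (1000 ^ (k + 1)) 1000 = 1000 ^ k := by
      rw [PySem.Int.floordiv_eq_ediv_of_pos (by omega), pow_succ,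
        Int.mul_ediv_cancel _ (by omega)]
    rw [hmd, hfd, hdd]
    have hmnn : 0 ≤ num % 1000 ^ (k + 1) := Int.emod_nonneg _ (by omega)
    have hmub : num % 1000 ^ (k + 1) < 1000 ^ (k + 1) := Int.emod_lt_of_pos _ hDpos
    rw [emit_acc ((1000:Int) ^ k).toNat _ _ _ (le_refl _), ih _ hmnn hmub,
        pad_split k num hnn]
    simp

-- ===== VERDICT (by name: the statement is the Claim_ definition above) =====
theorem buckets_of_py_spec : Claim_equal_buckets_of_py := by
  intro num _ hpre
  unfold Spec_buckets_of_py buckets_of_py buckets_of_py_alt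
  by_cases h0 : num = 0
  · subst h0
    unfold topDivB
    norm_num
    rw [emitLoopB]
    norm_num
    rw [emitLoopB]
    norm_num
  · have hp : 0 < num := by
      unfold Pre_buckets_of_py at hpre; omega
    simp only [h0, if_false]
    obtain ⟨j, hj, hl, hr⟩ :=
      topDivB_spec (num - 1).toNat num 1 (by omega) (by omega) (by omega)
    rw [loopA_digits num.toNat num [] (le_refl _), hj, one_mul,
      digits_pad j num (by omega) (by rw [pow_succ]; omega),
      emit_pad j num (by omega) (by rw [pow_succ]; omega)]
    simp
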